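-- pv_equiv track=rewrite | github.com/openvinotoolkit/openvino | ngraph/test/util/unit-test-execution/conftest.py | create_list_test
-- ===== SOURCE A (Python) =====
-- def create_list_test(stdout):
--     # Example of stdout content:
--     # 'CPU'
--     # ' zero_sized_abs'
--     # ' zero_sized_ceiling'
--     # ...
--     # So, list of test will be concatenation of 'CPU' and the second part (starting with ' '):
--     # 'CPU.zero_sized_abs'
--     # 'CPU.zero_sized_ceiling'
--     list_test = []
--     first_name, second_name = [''] * 2
--     for line in stdout:
--         if not line.startswith(' '):
--             first_name = line
--         else:
--             second_name = line
--             # Several test has gtest mark 'DISABLED' inside test - no test will be executed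
--             if not 'DISABLED' in line:
--                 list_test.append(first_name + second_name.strip())
--     return list_test
-- ===== SOURCE B (Python) =====
-- def create_list_test(stdout):
--     # Two-pass decomposition: a scan assigns each line the header prefix in force
--     # at that point, then a comprehension keeps the entry lines.
--     prefixes = []
--     cur = ''
--     for line in stdout:
--         if not line.startswith(' '):
--             cur = line
--         prefixes.append(cur)
--     return [p + l.strip() for l, p in zip(stdout, prefixes)
--             if l.startswith(' ') and 'DISABLED' not in l]
-- ===== Notes on version B (the rewrite author's own statement) =====
-- stated objective: alternative
-- what changed: Replaces A's single stateful loop that appends results in place by a two-pass pipeline: a scan producing the running header prefix per line, then a filtering comprehension over zip(stdout, prefixes).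
import Mathlib
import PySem

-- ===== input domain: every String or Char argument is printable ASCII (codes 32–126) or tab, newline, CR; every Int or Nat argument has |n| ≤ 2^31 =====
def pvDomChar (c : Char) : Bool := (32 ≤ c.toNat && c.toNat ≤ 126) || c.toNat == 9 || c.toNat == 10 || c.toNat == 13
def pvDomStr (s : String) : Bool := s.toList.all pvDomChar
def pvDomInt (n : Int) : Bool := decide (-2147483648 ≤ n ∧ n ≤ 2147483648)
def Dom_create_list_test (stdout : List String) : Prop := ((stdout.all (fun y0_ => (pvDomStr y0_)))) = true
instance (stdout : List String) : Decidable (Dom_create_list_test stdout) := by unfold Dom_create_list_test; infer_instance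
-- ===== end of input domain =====

-- ===== PORT A =====
-- B replaces A's stateful loop (mutable accumulator + header variable) with a structural
-- recursion carrying the current prefix and building the result front-to-back (alternative decomposition).
def pvStepA (st : List String × String × String) (line : String) : List String × String × String :=
  if ¬ (PySem.Str.startswith line " ") then (st.1, line, st.2.2)
  else
    let second_name := line
    if ¬ (PySem.Str.isIn "DISABLED" line) then
      (st.1 ++ [st.2.1 ++ PySem.Str.strip second_name], st.2.1, second_name)
    else (st.1, st.2.1, second_name)

def create_list_test (stdout : List String) : List String :=
  (stdout.foldl pvStepA ([], "", "")).1

-- ===== PORT B =====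
def pvStepPref (st : List String × String) (line : String) : List String × String :=
  let cur := if ¬ (PySem.Str.startswith line " ") then line else st.2
  (st.1 ++ [cur], cur)

def create_list_test_alt (stdout : List String) : List String :=
  let prefixes := (stdout.foldl pvStepPref ([], "")).1
  ((stdout.zip prefixes).filter
      (fun lp => PySem.Str.startswith lp.1 " " && ¬ PySem.Str.isIn "DISABLED" lp.1)).map
    (fun lp => lp.2 ++ PySem.Str.strip lp.1)

-- ===== PRECONDITION & SPEC =====
def Spec_create_list_test (stdout : List String) (out : List String) : Prop := out = create_list_test_alt stdout
instance (stdout : List String) (out : List String) : Decidable (Spec_create_list_test stdout out) := by unfold Spec_create_list_test; infer_instance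

-- ===== CLAIM (what is proved, stated in full; the proofs are below) =====
def Claim_equal_create_list_test : Prop := ∀ (stdout : List String), Dom_create_list_test stdout → Spec_create_list_test stdout (create_list_test stdout)

-- ===== LEMMAS AND PROOFS =====

-- ===== VERDICT (by name: the statement is the Claim_ definition above) =====
-- prefix scan in structural form (proof helper)
def pvPrefAux : List String → String → List String
  | [], _ => []
  | l :: ls, cur =>
    let c := if ¬ (PySem.Str.startswith l " ") then l else cur
    c :: pvPrefAux ls c

lemma foldlPref_aux (ls : List String) : ∀ (acc : List String) (cur : String),
    (ls.foldl pvStepPref (acc, cur)).1 = acc ++ pvPrefAux ls cur := by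
  induction ls with
  | nil => intro acc cur; simp [pvPrefAux]
  | cons l ls ih =>
    intro acc cur
    by_cases h : PySem.Chars.startswith l.toList [' '] = true
    · rw [List.foldl_cons]
      have hs : pvStepPref (acc, cur) l = (acc ++ [cur], cur) := by simp [pvStepPref, h]
      have hp : pvPrefAux (l :: ls) cur = cur :: pvPrefAux ls cur := by simp [pvPrefAux, h]
      rw [hs, ih, hp]; simp
    · rw [List.foldl_cons]
      have hs : pvStepPref (acc, cur) l = (acc ++ [l], l) := by simp [pvStepPref, h]
      have hp : pvPrefAux (l :: ls) cur = l :: pvPrefAux ls l := by simp [pvPrefAux, h]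
      rw [hs, ih, hp]; simp

-- B's pipeline started from an arbitrary running prefix (proof helper)
def pvPipe (ls : List String) (cur : String) : List String :=
  ((ls.zip (pvPrefAux ls cur)).filter
      (fun lp => PySem.Str.startswith lp.1 " " && ¬ PySem.Str.isIn "DISABLED" lp.1)).map
    (fun lp => lp.2 ++ PySem.Str.strip lp.1)

lemma foldlA_pipe (ls : List String) : ∀ (acc : List String) (first second : String),
    (ls.foldl pvStepA (acc, first, second)).1 = acc ++ pvPipe ls first := by
  induction ls with
  | nil => intro acc first second; simp [pvPipe, pvPrefAux]
  | cons head rest ih =>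
    intro acc first second
    rw [List.foldl_cons]
    by_cases h1 : PySem.Chars.startswith head.toList [' '] = true
    · by_cases h2 : PySem.Chars.isIn ['D', 'I', 'S', 'A', 'B', 'L', 'E', 'D'] head.toList = true
      · have hs : pvStepA (acc, first, second) head = (acc, first, head) := by
          simp [pvStepA, h1, h2]
        have hp : pvPipe (head :: rest) first = pvPipe rest first := by
          simp [pvPipe, pvPrefAux, h1, h2]
        rw [hs, ih, hp]
      · have hs : pvStepA (acc, first, second) head
            = (acc ++ [first ++ PySem.Str.strip head], first, head) := by
          simp [pvStepA, h1, h2]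
        have hp : pvPipe (head :: rest) first
            = (first ++ PySem.Str.strip head) :: pvPipe rest first := by
          simp [pvPipe, pvPrefAux, h1, h2]
        rw [hs, ih, hp]; simp
    · have hs : pvStepA (acc, first, second) head = (acc, head, second) := by
        simp [pvStepA, h1]
      have hp : pvPipe (head :: rest) first = pvPipe rest head := by
        simp [pvPipe, pvPrefAux, h1]
      rw [hs, ih, hp]

theorem create_list_test_spec : Claim_equal_create_list_test := by
  intro stdout _
  unfold Spec_create_list_test create_list_test create_list_test_alt
  rw [foldlA_pipe stdout [] "" "", foldlPref_aux stdout [] ""]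
  simp [pvPipe]
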